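-- pv_equiv track=rewrite | github.com/maxfra01/AoC-2024 | day22/day22.py | find_best_sequence
-- ===== SOURCE A (Python) =====
-- def mix_and_prune(secret, value):
--     secret ^= value
--     secret %= 16777216
--     return secret
--
-- def next_secret(secret):
--     secret = mix_and_prune(secret, secret * 64)
--     secret = mix_and_prune(secret, secret // 32)
--     secret = mix_and_prune(secret, secret * 2048)
--     return secret
--
-- def get_prices(initial_secret, iterations):
--     prices = []
--     secret = initial_secret
--     for _ in range(iterations):
--         secret = next_secret(secret)
--         prices.append(secret % 10)
--     return prices
--
-- def find_best_sequence(initial_secrets, iterations=2000):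
--     from itertools import product
--
--     best_sequence = None
--     max_bananas = 0
--
--     # Generate all possible sequences of four price changes
--     possible_sequences = list(product(range(-9, 10), repeat=4))
--
--     for sequence in possible_sequences:
--         total_bananas = 0
--         for secret in initial_secrets:
--             prices = get_prices(secret, iterations)
--             changes = [prices[i] - prices[i - 1] for i in range(1, len(prices))]
--             for i in range(len(changes) - 3):
--                 if changes[i:i + 4] == list(sequence):
--                     total_bananas += prices[i + 4]
--                     break
--         if total_bananas > max_bananas:
--             max_bananas = total_bananas
--             best_sequence = sequence
--
--     return best_sequence, max_bananas
-- ===== SOURCE B (Python) =====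
-- def find_best_sequence(initial_secrets, iterations=2000):
--     # One pass per buyer: record each 4-change sequence's first-occurrence price
--     # into a global totals dict, then scan sequences once for the best total.
--     totals = {}
--     for secret in initial_secrets:
--         prices = []
--         s = secret
--         for _ in range(iterations):
--             s = (s ^ (s * 64)) % 16777216
--             s = (s ^ (s // 32)) % 16777216
--             s = (s ^ (s * 2048)) % 16777216
--             prices.append(s % 10)
--         first = {}
--         for i in range(len(prices) - 4):
--             seq = (prices[i + 1] - prices[i], prices[i + 2] - prices[i + 1],
--                    prices[i + 3] - prices[i + 2], prices[i + 4] - prices[i + 3])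
--             first.setdefault(seq, prices[i + 4])
--         for seq, p in first.items():
--             totals[seq] = totals.get(seq, 0) + p
--     best_sequence, max_bananas = None, 0
--     for a in range(-9, 10):
--         for b in range(-9, 10):
--             for c in range(-9, 10):
--                 for d in range(-9, 10):
--                     t = totals.get((a, b, c, d), 0)
--                     if t > max_bananas:
--                         best_sequence, max_bananas = (a, b, c, d), t
--     return best_sequence, max_bananas
-- ===== Notes on version B (the rewrite author's own statement) =====
-- stated objective: faster
-- what changed: Instead of rescanning every buyer's full price list for each of the 19^4 candidate sequences, B makes one pass per buyer recording each 4-change sequence's first-occurrence price into a global totals dict, then picks the best by a single dict-lookup scan over the candidates.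
import Mathlib
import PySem

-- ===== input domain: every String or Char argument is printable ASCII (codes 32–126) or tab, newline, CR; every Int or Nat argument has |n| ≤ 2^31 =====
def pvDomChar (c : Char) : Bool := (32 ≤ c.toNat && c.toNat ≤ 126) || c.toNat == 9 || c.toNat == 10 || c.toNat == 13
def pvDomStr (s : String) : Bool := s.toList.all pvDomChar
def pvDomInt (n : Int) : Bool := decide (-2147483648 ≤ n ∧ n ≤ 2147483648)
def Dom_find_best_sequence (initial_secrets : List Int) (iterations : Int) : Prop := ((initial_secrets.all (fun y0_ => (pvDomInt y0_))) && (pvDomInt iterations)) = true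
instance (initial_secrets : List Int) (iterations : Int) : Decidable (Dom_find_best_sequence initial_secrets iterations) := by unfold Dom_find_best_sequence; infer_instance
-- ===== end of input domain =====

-- B replaces A's scan over all 19^4 sequences with per-buyer recomputation by one pass per
-- buyer into a global first-occurrence totals dict, then a single lookup scan (objective: faster).

-- ===== PORT A =====
def mix_and_prune (secret value : Int) : Int :=
  PySem.Int.mod (PySem.Int.bxor secret value) 16777216

def next_secret (secret : Int) : Int :=
  let s1 := mix_and_prune secret (secret * 64)
  let s2 := mix_and_prune s1 (PySem.Int.floordiv s1 32)
  mix_and_prune s2 (s2 * 2048)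

def get_prices (initial_secret : Int) (iterations : Int) : List Int :=
  ((PySem.List.pyRange 0 iterations 1).foldl
    (fun (st : List Int × Int) _ =>
      let s := next_secret st.2
      (st.1 ++ [PySem.Int.mod s 10], s)) ([], initial_secret)).1

-- list(product(range(-9, 10), repeat=4)), tuples as 4-element lists
def possible_sequences : List (List Int) :=
  (PySem.List.pyRange (-9) 10 1).flatMap (fun a =>
    (PySem.List.pyRange (-9) 10 1).flatMap (fun b =>
      (PySem.List.pyRange (-9) 10 1).flatMap (fun c =>
        (PySem.List.pyRange (-9) 10 1).map (fun d => [a, b, c, d]))))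

-- 'for i in range(len(changes)-3): if changes[i:i+4]==list(sequence): total += prices[i+4]; break'
def firstMatchLoop (changes prices sequence : List Int) : List Int → Int → Int
  | [], total => total
  | i :: rest, total =>
      if PySem.List.slice changes (some i) (some (i + 4)) = sequence then
        total + PySem.List.pyGetD prices (i + 4) 0
      else firstMatchLoop changes prices sequence rest total

def find_best_sequence (initial_secrets : List Int) (iterations : Int) : Option (List Int) × Int :=
  possible_sequences.foldl
    (fun (st : Option (List Int) × Int) sequence =>
      let total := initial_secrets.foldl
        (fun total secret =>
          let prices := get_prices secret iterations
          let changes := (PySem.List.pyRange 1 (prices.length : Int) 1).map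
            (fun i => PySem.List.pyGetD prices i 0 - PySem.List.pyGetD prices (i - 1) 0)
          firstMatchLoop changes prices sequence
            (PySem.List.pyRange 0 ((changes.length : Int) - 3) 1) total) 0
      if st.2 < total then (some sequence, total) else st)
    (none, 0)

-- ===== PORT B =====
-- the inlined price-generation loop of Source B
def pricesB (secret : Int) (iterations : Int) : List Int :=
  ((PySem.List.pyRange 0 iterations 1).foldl
    (fun (st : List Int × Int) _ =>
      let s1 := PySem.Int.mod (PySem.Int.bxor st.2 (st.2 * 64)) 16777216
      let s2 := PySem.Int.mod (PySem.Int.bxor s1 (PySem.Int.floordiv s1 32)) 16777216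
      let s3 := PySem.Int.mod (PySem.Int.bxor s2 (s2 * 2048)) 16777216
      (st.1 ++ [PySem.Int.mod s3 10], s3)) ([], secret)).1

-- per-buyer dict: first-occurrence price of each 4-change sequence
def firstDict (prices : List Int) : PySem.Dict (List Int) Int :=
  (PySem.List.pyRange 0 ((prices.length : Int) - 4) 1).foldl
    (fun d i =>
      d.setdefault
        [PySem.List.pyGetD prices (i + 1) 0 - PySem.List.pyGetD prices i 0,
         PySem.List.pyGetD prices (i + 2) 0 - PySem.List.pyGetD prices (i + 1) 0,
         PySem.List.pyGetD prices (i + 3) 0 - PySem.List.pyGetD prices (i + 2) 0,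
         PySem.List.pyGetD prices (i + 4) 0 - PySem.List.pyGetD prices (i + 3) 0]
        (PySem.List.pyGetD prices (i + 4) 0))
    PySem.Dict.empty

def find_best_sequence_alt (initial_secrets : List Int) (iterations : Int) : Option (List Int) × Int :=
  let totals := initial_secrets.foldl
    (fun (totals : PySem.Dict (List Int) Int) secret =>
      (firstDict (pricesB secret iterations)).items.foldl
        (fun t kv => t.insert kv.1 (t.getD kv.1 0 + kv.2)) totals)
    PySem.Dict.empty
  (PySem.List.pyRange (-9) 10 1).foldl (fun st a =>
    (PySem.List.pyRange (-9) 10 1).foldl (fun st b =>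
      (PySem.List.pyRange (-9) 10 1).foldl (fun st c =>
        (PySem.List.pyRange (-9) 10 1).foldl (fun st d =>
          let t := totals.getD [a, b, c, d] 0
          if st.2 < t then (some [a, b, c, d], t) else st) st) st) st)
    ((none : Option (List Int)), (0 : Int))

-- ===== PRECONDITION & SPEC =====
def Spec_find_best_sequence (initial_secrets : List Int) (iterations : Int) (out : Option (List Int) × Int) : Prop := out = find_best_sequence_alt initial_secrets iterations
instance (initial_secrets : List Int) (iterations : Int) (out : Option (List Int) × Int) : Decidable (Spec_find_best_sequence initial_secrets iterations out) := by unfold Spec_find_best_sequence; infer_instance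

-- ===== CLAIM (what is proved, stated in full; the proofs are below) =====
def Claim_equal_find_best_sequence : Prop := ∀ (initial_secrets : List Int) (iterations : Int), Dom_find_best_sequence initial_secrets iterations → Spec_find_best_sequence initial_secrets iterations (find_best_sequence initial_secrets iterations)

-- ===== LEMMAS AND PROOFS =====

-- first value associated to seq along a list of indices
def firstKV (key : Int → List Int) (val : Int → Int) (seq : List Int) : List Int → Option Int
  | [] => none
  | i :: rest => if key i = seq then some (val i) else firstKV key val seq rest

-- the key/value functions used by firstDict
def keyF (prices : List Int) (i : Int) : List Int :=
  [PySem.List.pyGetD prices (i + 1) 0 - PySem.List.pyGetD prices i 0,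
   PySem.List.pyGetD prices (i + 2) 0 - PySem.List.pyGetD prices (i + 1) 0,
   PySem.List.pyGetD prices (i + 3) 0 - PySem.List.pyGetD prices (i + 2) 0,
   PySem.List.pyGetD prices (i + 4) 0 - PySem.List.pyGetD prices (i + 3) 0]

def valF (prices : List Int) (i : Int) : Int := PySem.List.pyGetD prices (i + 4) 0

-- per-buyer contribution of seq, as A's break-loop computes it
def contrib (prices seq : List Int) : Int :=
  (firstKV (keyF prices) (valF prices) seq
    (PySem.List.pyRange 0 ((prices.length : Int) - 4) 1)).getD 0

theorem pricesB_eq (s it : Int) : pricesB s it = get_prices s it := rfl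

theorem firstMatchLoop_eq (changes prices seq : List Int) (L : List Int) (total : Int) :
    firstMatchLoop changes prices seq L total =
      total + (firstKV (fun i => PySem.List.slice changes (some i) (some (i + 4)))
        (fun i => PySem.List.pyGetD prices (i + 4) 0) seq L).getD 0 := by
  induction L generalizing total with
  | nil => simp [firstMatchLoop, firstKV]
  | cons i rest ih =>
      simp only [firstMatchLoop, firstKV]
      split_ifs with h
      · simp
      · simp [ih]

theorem firstKV_congr (key₁ key₂ : Int → List Int) (val₁ val₂ : Int → Int) (seq : List Int)
    (L : List Int) (h : ∀ i ∈ L, key₁ i = key₂ i ∧ val₁ i = val₂ i) :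
    firstKV key₁ val₁ seq L = firstKV key₂ val₂ seq L := by
  induction L with
  | nil => rfl
  | cons i rest ih =>
      obtain ⟨hk, hv⟩ := h i (List.mem_cons_self ..)
      simp only [firstKV, hk, hv]
      split_ifs with h'
      · rfl
      · exact ih (fun j hj => h j (List.mem_cons_of_mem _ hj))

-- the slice of changes equals B's direct 4-difference key
theorem take4_drop (xs : List Int) (a : Nat) (h : a + 4 ≤ xs.length) :
    (xs.drop a).take 4 = [xs[a]'(by omega), xs[a+1]'(by omega), xs[a+2]'(by omega), xs[a+3]'(by omega)] := by
  apply List.ext_getElem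
  · simp; omega
  · intro j h1 h2
    have hj : j < 4 := by simp at h1; omega
    simp only [List.getElem_take, List.getElem_drop]
    interval_cases j <;> simp

-- the slice of changes equals B's direct 4-difference key
theorem slice_changes_eq_key (prices : List Int) (i : Int)
    (h0 : 0 ≤ i) (h4 : i + 4 < (prices.length : Int)) :
    PySem.List.slice ((PySem.List.pyRange 1 (prices.length : Int) 1).map
        (fun j => PySem.List.pyGetD prices j 0 - PySem.List.pyGetD prices (j - 1) 0))
      (some i) (some (i + 4)) = keyF prices i := by
  simp only [keyF]
  obtain ⟨a, rfl⟩ : ∃ a : Nat, i = (a : Int) := ⟨i.toNat, (Int.toNat_of_nonneg h0).symm⟩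
  set xs := (PySem.List.pyRange 1 (prices.length : Int) 1).map
      (fun j => PySem.List.pyGetD prices j 0 - PySem.List.pyGetD prices (j - 1) 0) with hxs
  have hlen : xs.length = prices.length - 1 := by
    rw [hxs, List.length_map, PySem.List.length_pyRange_one]; omega
  have hb : a + 4 ≤ xs.length := by omega
  have hcast : ((a : Int) + 4) = ((a + 4 : Nat) : Int) := by push_cast; ring
  rw [hcast, PySem.List.slice_natCast, show a + 4 - a = 4 from by omega, take4_drop xs a hb]
  have helt : ∀ (k : Nat) (hk : k < xs.length), xs[k] =
      PySem.List.pyGetD prices ((k : Int) + 1) 0 - PySem.List.pyGetD prices (k : Int) 0 := by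
    intro k hk
    simp only [hxs, List.getElem_map, PySem.List.getElem_pyRange_one]
    norm_num
    ring_nf
  rw [helt a (by omega), helt (a+1) (by omega), helt (a+2) (by omega), helt (a+3) (by omega)]
  push_cast
  ring_nf

-- A's index range equals B's
theorem ranges_eq (n : Nat) (f : Int → Int) :
    PySem.List.pyRange 0 ((((PySem.List.pyRange 1 (n : Int) 1).map f).length : Int) - 3) 1
    = PySem.List.pyRange 0 ((n : Int) - 4) 1 := by
  rw [List.length_map, PySem.List.length_pyRange_one]
  rcases Nat.eq_zero_or_pos n with h | h
  · subst h
    rw [PySem.List.pyRange_one_eq_nil (by norm_num), PySem.List.pyRange_one_eq_nil (by norm_num)]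
  · congr 1
    omega

-- the setdefault loop computes the first occurrence
theorem foldl_setdefault_get? (key : Int → List Int) (val : Int → Int) (seq : List Int)
    (L : List Int) (d : PySem.Dict (List Int) Int) :
    (L.foldl (fun d i => d.setdefault (key i) (val i)) d).get? seq =
      (d.get? seq).or (firstKV key val seq L) := by
  induction L generalizing d with
  | nil => simp [firstKV]
  | cons i rest ih =>
      simp only [List.foldl_cons, firstKV, ih]
      by_cases h : key i = seq
      · subst h
        rw [PySem.Dict.get?_setdefault_self]
        cases hd : d.get? (key i) <;> simp [Option.or]
      · rw [PySem.Dict.get?_setdefault_of_ne d (val i) (Ne.symm h)]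
        simp [h]

theorem firstDict_get? (prices seq : List Int) :
    (firstDict prices).get? seq =
      firstKV (keyF prices) (valF prices) seq
        (PySem.List.pyRange 0 ((prices.length : Int) - 4) 1) := by
  have := foldl_setdefault_get? (keyF prices) (valF prices) seq
    (PySem.List.pyRange 0 ((prices.length : Int) - 4) 1) PySem.Dict.empty
  simpa [firstDict, keyF, valF, PySem.Dict.get?_empty, Option.or] using this

theorem keys_setdefault_nodup (d : PySem.Dict (List Int) Int) (k : List Int) (v : Int)
    (h : d.keys.Nodup) : (d.setdefault k v).keys.Nodup := by
  rw [PySem.Dict.keys_setdefault]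
  split_ifs with hc
  · exact h
  · have : k ∉ d.keys := by
      rw [← PySem.Dict.contains_iff_mem_keys]
      simp [hc]
    simp [List.nodup_append, h]
    exact fun a ha hak => this (hak ▸ ha)

theorem firstDict_keys_nodup (prices : List Int) : (firstDict prices).keys.Nodup := by
  have : ∀ (L : List Int) (d : PySem.Dict (List Int) Int), d.keys.Nodup →
      (L.foldl (fun d i => d.setdefault (keyF prices i) (valF prices i)) d).keys.Nodup := by
    intro L
    induction L with
    | nil => exact fun d h => h
    | cons i rest ih =>
        intro d h
        exact ih _ (keys_setdefault_nodup _ _ _ h)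
  exact this _ PySem.Dict.empty (by simp [PySem.Dict.keys_empty])

-- merging an assoc list with nodup keys adds its lookup value pointwise
theorem merge_getD (l : List (List Int × Int)) (t : PySem.Dict (List Int) Int) (seq : List Int)
    (h : (l.map (·.1)).Nodup) :
    (l.foldl (fun t kv => t.insert kv.1 (t.getD kv.1 0 + kv.2)) t).getD seq 0 =
      t.getD seq 0 + ((PySem.Dict.mk l).get? seq).getD 0 := by
  induction l generalizing t with
  | nil => simp [PySem.Dict.get?]
  | cons kv rest ih =>
      obtain ⟨k, v⟩ := kv
      simp only [List.map_cons, List.nodup_cons] at h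
      obtain ⟨hk, hrest⟩ := h
      simp only [List.foldl_cons, ih _ hrest, PySem.Dict.get?_mk_cons]
      by_cases hs : seq = k
      · subst hs
        rw [PySem.Dict.getD_insert]
        have : (PySem.Dict.mk rest).get? seq = none := by
          rw [PySem.Dict.get?_eq_none_iff_not_mem_keys]
          simpa [PySem.Dict.keys] using hk
        simp [this]
      · rw [PySem.Dict.getD_insert]
        simp [hs, Ne.symm hs]

-- B's totals dict accumulates every buyer's contribution
theorem totals_getD (secrets : List Int) (iterations : Int) (t : PySem.Dict (List Int) Int)
    (seq : List Int) :
    ((secrets.foldl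
        (fun (totals : PySem.Dict (List Int) Int) secret =>
          (firstDict (pricesB secret iterations)).items.foldl
            (fun t kv => t.insert kv.1 (t.getD kv.1 0 + kv.2)) totals) t).getD seq 0) =
      t.getD seq 0 + (secrets.map (fun s => contrib (pricesB s iterations) seq)).sum := by
  induction secrets generalizing t with
  | nil => simp
  | cons s rest ih =>
      simp only [List.foldl_cons, ih, List.map_cons, List.sum_cons]
      have hnd : ((firstDict (pricesB s iterations)).items.map (·.1)).Nodup := by
        have := firstDict_keys_nodup (pricesB s iterations)
        simpa [PySem.Dict.keys] using this
      rw [merge_getD _ t seq hnd]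
      have hmk : PySem.Dict.mk (firstDict (pricesB s iterations)).items
          = firstDict (pricesB s iterations) := rfl
      rw [hmk, firstDict_get?]
      simp only [contrib]
      ring

-- A's per-sequence total equals B's dict lookup
theorem totalA_eq (secrets : List Int) (iterations : Int) (seq : List Int) :
    (secrets.foldl
        (fun total secret =>
          let prices := get_prices secret iterations
          let changes := (PySem.List.pyRange 1 (prices.length : Int) 1).map
            (fun i => PySem.List.pyGetD prices i 0 - PySem.List.pyGetD prices (i - 1) 0)
          firstMatchLoop changes prices seq
            (PySem.List.pyRange 0 ((changes.length : Int) - 3) 1) total) 0) =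
      (secrets.map (fun s => contrib (pricesB s iterations) seq)).sum := by
  have hbody : ∀ (total secret : Int),
      (let prices := get_prices secret iterations
       let changes := (PySem.List.pyRange 1 (prices.length : Int) 1).map
         (fun i => PySem.List.pyGetD prices i 0 - PySem.List.pyGetD prices (i - 1) 0)
       firstMatchLoop changes prices seq
         (PySem.List.pyRange 0 ((changes.length : Int) - 3) 1) total) =
      total + contrib (pricesB secret iterations) seq := by
    intro total secret
    simp only [pricesB_eq]
    set p := get_prices secret iterations with hp
    rw [firstMatchLoop_eq, ranges_eq p.length
      (fun i => PySem.List.pyGetD p i 0 - PySem.List.pyGetD p (i - 1) 0)]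
    rw [contrib, firstKV_congr
      (fun i => PySem.List.slice ((PySem.List.pyRange 1 (p.length : Int) 1).map
        (fun j => PySem.List.pyGetD p j 0 - PySem.List.pyGetD p (j - 1) 0)) (some i) (some (i + 4)))
      (keyF p) (fun i => PySem.List.pyGetD p (i + 4) 0) (valF p) seq _ ?_]
    intro i hi
    rw [PySem.List.mem_pyRange_one] at hi
    exact ⟨slice_changes_eq_key p i hi.1 (by omega), rfl⟩
  calc secrets.foldl _ 0
      = secrets.foldl (fun total s => total + contrib (pricesB s iterations) seq) 0 :=
        PySem.List.foldl_congr_mem secrets _ _ 0 (fun total s _ => hbody total s)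
    _ = (secrets.map (fun s => contrib (pricesB s iterations) seq)).sum := by
        rw [PySem.List.foldl_add]
        simp

-- ===== VERDICT (by name: the statement is the Claim_ definition above) =====
theorem find_best_sequence_spec : Claim_equal_find_best_sequence := by
  intro secrets iterations _
  unfold Spec_find_best_sequence
  rw [find_best_sequence, find_best_sequence_alt, possible_sequences]
  simp only [List.foldl_flatMap, List.foldl_map]
  have key : ∀ seq : List Int,
      (secrets.foldl
        (fun total secret =>
          let prices := get_prices secret iterations
          let changes := (PySem.List.pyRange 1 (prices.length : Int) 1).map
            (fun i => PySem.List.pyGetD prices i 0 - PySem.List.pyGetD prices (i - 1) 0)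
          firstMatchLoop changes prices seq
            (PySem.List.pyRange 0 ((changes.length : Int) - 3) 1) total) 0) =
      (secrets.foldl
        (fun (totals : PySem.Dict (List Int) Int) secret =>
          (firstDict (pricesB secret iterations)).items.foldl
            (fun t kv => t.insert kv.1 (t.getD kv.1 0 + kv.2)) totals)
        PySem.Dict.empty).getD seq 0 := by
    intro seq
    rw [totalA_eq, totals_getD]
    simp
  simp only [key]
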